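-- pv_equiv track=rewrite | github.com/FennStatistics/Project_LLCon | search/evaluator.py | build_positions
-- ===== SOURCE A (Python) =====
-- def build_positions(tokens: list[str], terms: list[str]) -> dict[str, list[int]]:
--     positions: dict[str, list[int]] = {term: [] for term in terms}
--     unique_terms = sorted(set(terms))
--     for term in unique_terms:
--         if term.endswith("*"):
--             prefix = term[:-1]
--             positions[term] = [
--                 index for index, token in enumerate(tokens) if token.startswith(prefix)
--             ]
--         else:
--             positions[term] = [
--                 index for index, token in enumerate(tokens) if token == term
--             ]
--     return positions
-- ===== SOURCE B (Python) =====
-- def build_positions(tokens: list[str], terms: list[str]) -> dict[str, list[int]]: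
--     # One pass over tokens builds an inverted index token -> positions; exact terms
--     # are then O(1) lookups instead of a full scan per term.
--     index: dict[str, list[int]] = {}
--     for i, tok in enumerate(tokens):
--         index.setdefault(tok, []).append(i)
--     result: dict[str, list[int]] = {}
--     for term in terms:
--         if term.endswith("*"):
--             prefix = term[:-1]
--             result[term] = [i for i, tok in enumerate(tokens) if tok.startswith(prefix)]
--         else:
--             result[term] = index.get(term, [])
--     return result
-- ===== Notes on version B (the rewrite author's own statement) =====
-- stated objective: faster
-- what changed: Instead of scanning all tokens once per (sorted-unique) term, B builds a token->positions inverted index in one pass and answers every exact term by a dictionary lookup, scanning tokens only for wildcard terms; the init-then-overwrite dict and the sorted(set(terms)) pass disappear.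
import Mathlib
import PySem

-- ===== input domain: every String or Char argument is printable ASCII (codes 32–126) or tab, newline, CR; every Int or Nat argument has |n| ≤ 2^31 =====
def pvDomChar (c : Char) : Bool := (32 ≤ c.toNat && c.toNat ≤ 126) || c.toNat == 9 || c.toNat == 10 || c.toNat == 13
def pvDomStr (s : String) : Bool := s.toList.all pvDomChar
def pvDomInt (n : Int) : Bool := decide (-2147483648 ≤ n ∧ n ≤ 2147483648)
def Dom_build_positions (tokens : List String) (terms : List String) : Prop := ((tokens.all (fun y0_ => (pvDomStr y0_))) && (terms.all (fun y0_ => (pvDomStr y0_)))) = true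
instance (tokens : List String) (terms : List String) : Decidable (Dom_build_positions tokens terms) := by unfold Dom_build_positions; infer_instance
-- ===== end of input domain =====

-- B builds a token->positions inverted index in one pass and answers exact terms by lookup (faster); A scans all tokens once per unique term.


-- ===== PORT A =====
def build_positions (tokens : List String) (terms : List String) : List (String × List Int) :=
  let positions : PySem.Dict String (List Int) :=
    terms.foldl (fun d term => d.insert term []) PySem.Dict.empty
  let unique_terms := PySem.List.sorted (PySem.Set.ofList terms) (fun t => t) false
  let positions :=
    unique_terms.foldl (fun d term =>
      if PySem.Str.endswith term "*" then
        let pre := PySem.Str.slice term none (some (-1))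
        d.insert term ((PySem.List.enumerate tokens).filterMap
          (fun p => if PySem.Str.startswith p.2 pre then some p.1 else none))
      else
        d.insert term ((PySem.List.enumerate tokens).filterMap
          (fun p => if p.2 == term then some p.1 else none))) positions
  positions.items

-- ===== PORT B =====
def build_positions_alt (tokens : List String) (terms : List String) : List (String × List Int) :=
  let index : PySem.Dict String (List Int) :=
    (PySem.List.enumerate tokens).foldl
      (fun d p => d.modify p.2 [] (· ++ [p.1])) PySem.Dict.empty
  let result : PySem.Dict String (List Int) :=
    terms.foldl (fun d term =>
      if PySem.Str.endswith term "*" then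
        let pre := PySem.Str.slice term none (some (-1))
        d.insert term ((PySem.List.enumerate tokens).filterMap
          (fun p => if PySem.Str.startswith p.2 pre then some p.1 else none))
      else
        d.insert term (index.getD term [])) PySem.Dict.empty
  result.items

-- ===== PRECONDITION & SPEC =====
def Spec_build_positions (tokens : List String) (terms : List String) (out : List (String × List Int)) : Prop := out = build_positions_alt tokens terms
instance (tokens : List String) (terms : List String) (out : List (String × List Int)) : Decidable (Spec_build_positions tokens terms out) := by unfold Spec_build_positions; infer_instance

-- ===== CLAIM (what is proved, stated in full; the proofs are below) =====
def Claim_equal_build_positions : Prop := ∀ (tokens : List String) (terms : List String), Dom_build_positions tokens terms → Spec_build_positions tokens terms (build_positions tokens terms)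

-- ===== LEMMAS AND PROOFS =====

-- the per-term value both programs end up storing (A's branch value; proved equal to B's below)
def pvVal (tokens : List String) (term : String) : List Int :=
  if PySem.Str.endswith term "*" then
    (PySem.List.enumerate tokens).filterMap
      (fun p => if PySem.Str.startswith p.2 (PySem.Str.slice term none (some (-1))) then some p.1 else none)
  else
    (PySem.List.enumerate tokens).filterMap
      (fun p => if p.2 == term then some p.1 else none)

-- lookups through a fold of inserts with a key-determined value
lemma getD_foldl_insert_fn (h : String → List Int) (ts : List String)
    (d : PySem.Dict String (List Int)) (k : String) :
    (ts.foldl (fun d t => d.insert t (h t)) d).getD k [] = if k ∈ ts then h k else d.getD k [] := by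
  induction ts generalizing d with
  | nil => simp
  | cons t ts ih =>
    simp only [List.foldl_cons, ih, PySem.Dict.getD_insert, List.mem_cons]
    by_cases h1 : k ∈ ts <;> by_cases h2 : k = t <;> simp [h1, h2]

-- updating a set with elements it already has changes nothing
lemma set_update_of_subset (s l : List String) (h : ∀ x ∈ l, x ∈ s) :
    PySem.Set.update s l = s := by
  rw [PySem.Set.update_eq_append_filter]
  have hz : (PySem.Set.ofList l).filter (fun y => !(PySem.Set.contains s y)) = [] := by
    apply List.filter_eq_nil_iff.mpr
    intro y hy
    simp
    exact h y ((PySem.Set.mem_ofList _ _).mp hy)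
  rw [hz, List.append_nil]

-- gathering values by key from the swapped pairs is the matching filterMap
lemma gather_eq (l : List (Int × String)) (t : String) :
    ((l.map (fun p => (p.2, p.1))).filter (fun q => q.1 == t)).map (·.2)
      = l.filterMap (fun p => if p.2 == t then some p.1 else none) := by
  induction l with
  | nil => rfl
  | cons p l ih =>
    by_cases hp : p.2 = t <;> simp [hp, ih]

-- A's and B's loop bodies, as insert of a key-determined value
lemma stepA_eq (tokens : List String) :
    (fun (d : PySem.Dict String (List Int)) term =>
      if PySem.Str.endswith term "*" then
        let pre := PySem.Str.slice term none (some (-1))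
        d.insert term ((PySem.List.enumerate tokens).filterMap
          (fun p => if PySem.Str.startswith p.2 pre then some p.1 else none))
      else
        d.insert term ((PySem.List.enumerate tokens).filterMap
          (fun p => if p.2 == term then some p.1 else none)))
      = fun d term => d.insert term (pvVal tokens term) := by
  funext d term
  unfold pvVal
  split <;> rfl

lemma indexD_eq (tokens : List String) (t : String) :
    ((PySem.List.enumerate tokens).foldl
        (fun d p => d.modify p.2 [] (· ++ [p.1])) PySem.Dict.empty).getD t []
      = (PySem.List.enumerate tokens).filterMap
          (fun p => if p.2 == t then some p.1 else none) := by
  rw [← List.foldl_map (f := fun p : Int × String => (p.2, p.1))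
        (g := fun d q => PySem.Dict.modify d q.1 [] (· ++ [q.2]))]
  rw [PySem.Dict.getD_foldl_modify_append]
  simp [gather_eq]

lemma stepB_eq (tokens : List String) :
    (fun (d : PySem.Dict String (List Int)) term =>
      if PySem.Str.endswith term "*" then
        let pre := PySem.Str.slice term none (some (-1))
        d.insert term ((PySem.List.enumerate tokens).filterMap
          (fun p => if PySem.Str.startswith p.2 pre then some p.1 else none))
      else
        d.insert term (((PySem.List.enumerate tokens).foldl
          (fun d p => d.modify p.2 [] (· ++ [p.1])) PySem.Dict.empty).getD term []))
      = fun d term => d.insert term (pvVal tokens term) := by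
  funext d term
  unfold pvVal
  split
  · rfl
  · rw [indexD_eq]

-- keys of a fold of inserts from the empty dict
lemma keys_fold (h : String → List Int) (ts : List String) :
    ((ts.foldl (fun d t => d.insert t (h t)) PySem.Dict.empty)).keys
      = PySem.Set.ofList ts := by
  rw [PySem.Dict.keys_foldl_insert _ (fun _ t => h t)]
  simp [PySem.Set.update_nil_left]

-- items of a fold of inserts from the empty dict
lemma items_fold (h : String → List Int) (ts : List String) :
    ((ts.foldl (fun d t => d.insert t (h t)) PySem.Dict.empty)).items
      = (PySem.Set.ofList ts).map (fun k => (k, h k)) := by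
  have hk := keys_fold h ts
  have hnd : ((ts.foldl (fun d t => d.insert t (h t)) PySem.Dict.empty)).keys.Nodup := by
    rw [hk]; exact PySem.Set.nodup_ofList _
  rw [PySem.Dict.items_eq_map_keys _ hnd [], hk]
  apply List.map_congr_left
  intro k hkmem
  have : k ∈ ts := (PySem.Set.mem_ofList _ _).mp hkmem
  rw [getD_foldl_insert_fn]
  simp [this]

-- ===== VERDICT (by name: the statement is the Claim_ definition above) =====
theorem build_positions_spec : Claim_equal_build_positions := by
  intro tokens terms _
  show build_positions tokens terms = build_positions_alt tokens terms
  unfold build_positions build_positions_alt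
  simp only [stepA_eq tokens, stepB_eq tokens]
  rw [items_fold]
  -- A side: init dict of empty lists, then overwrite every unique term
  set uts := PySem.List.sorted (PySem.Set.ofList terms) (fun t => t) false with huts
  have hmem : ∀ x, x ∈ uts ↔ x ∈ terms := by
    intro x
    rw [huts, PySem.List.mem_sorted, PySem.Set.mem_ofList _ _]
  -- keys of the final A dict
  have hkeysInit : (terms.foldl (fun d t => d.insert t ([] : List Int)) PySem.Dict.empty).keys
      = PySem.Set.ofList terms := keys_fold (fun _ => []) terms
  have hkeysA : ((uts.foldl (fun d t => d.insert t (pvVal tokens t))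
      (terms.foldl (fun d t => d.insert t ([] : List Int)) PySem.Dict.empty))).keys
      = PySem.Set.ofList terms := by
    rw [PySem.Dict.keys_foldl_insert _ (fun _ t => pvVal tokens t), hkeysInit]
    exact set_update_of_subset _ _ (fun x hx => (PySem.Set.mem_ofList _ _).mpr ((hmem x).mp hx))
  have hndA : ((uts.foldl (fun d t => d.insert t (pvVal tokens t))
      (terms.foldl (fun d t => d.insert t ([] : List Int)) PySem.Dict.empty))).keys.Nodup := by
    rw [hkeysA]; exact PySem.Set.nodup_ofList _
  rw [PySem.Dict.items_eq_map_keys _ hndA [], hkeysA]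
  apply List.map_congr_left
  intro k hkmem
  have hk : k ∈ terms := (PySem.Set.mem_ofList _ _).mp hkmem
  rw [getD_foldl_insert_fn]
  simp [(hmem k).mpr hk]
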